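-- pv_equiv track=rewrite | github.com/vakaflow-ai/vakaflow | backend/scripts/import_questionnaire_excel.py | determine_questionnaire_type
-- ===== SOURCE A (Python) =====
-- def determine_questionnaire_type(filename, question_text, category=None):
--     """Determine questionnaire type based on filename and question content"""
--     filename_lower = filename.lower()
--     question_lower = (question_text or '').lower()
--
--     # Check filename first
--     if 'tprm' in filename_lower or 'third-party' in filename_lower or 'third_party' in filename_lower:
--         return "TPRM- Questionnaire"
--     elif 'cybersecurity' in filename_lower or 'security' in filename_lower:
--         return "Vendor Security Questionnaire"
--     elif 'sub' in filename_lower and ('contractor' in filename_lower or 'contract' in filename_lower):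
--         return "Sub Contractor Questionnaire"
--     elif 'ai' in filename_lower or 'qualification' in filename_lower:
--         return "Vendor Qualification"
--
--     # Check question content
--     if any(keyword in question_lower for keyword in ['third-party', 'vendor risk', 'tprm', 'third party', 'supplier', 'vendor management']):
--         return "TPRM- Questionnaire"
--     elif any(keyword in question_lower for keyword in ['security', 'authentication', 'authorization', 'encryption', 'vulnerability', 'incident', 'cyber', 'firewall', 'malware']):
--         return "Vendor Security Questionnaire"
--     elif any(keyword in question_lower for keyword in ['sub-contractor', 'subcontractor', 'sub contractor', 'employee', 'support', 'maintenance', 'sla']):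
--         return "Sub Contractor Questionnaire"
--     elif any(keyword in question_lower for keyword in ['compliance', 'certification', 'regulatory', 'gdpr', 'soc', 'iso', 'hipaa', 'pci', 'nist', 'qualification', 'certificate']):
--         return "Vendor Qualification"
--
--     # Default based on category
--     if category:
--         category_lower = category.lower()
--         if 'security' in category_lower:
--             return "Vendor Security Questionnaire"
--         elif 'compliance' in category_lower:
--             return "Vendor Qualification"
--
--     return "Vendor Qualification"  # Default
-- ===== SOURCE B (Python) =====
-- # Flat keyword index: every (priority, text, keywords, label) entry is checked,
-- # ALL matches are collected, and the label of the minimal-priority match wins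
-- # (default "Vendor Qualification" when nothing matches).
--
-- def determine_questionnaire_type(filename, question_text, category=None):
--     """Determine questionnaire type based on filename and question content"""
--     fl = filename.lower()
--     ql = (question_text or '').lower()
--     cl = (category or '').lower()
--     index = [
--         (0, fl, ('tprm',), "TPRM- Questionnaire"),
--         (0, fl, ('third-party',), "TPRM- Questionnaire"),
--         (0, fl, ('third_party',), "TPRM- Questionnaire"),
--         (1, fl, ('cybersecurity',), "Vendor Security Questionnaire"),
--         (1, fl, ('security',), "Vendor Security Questionnaire"),
--         (2, fl, ('sub', 'contractor'), "Sub Contractor Questionnaire"),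
--         (2, fl, ('sub', 'contract'), "Sub Contractor Questionnaire"),
--         (3, fl, ('ai',), "Vendor Qualification"),
--         (3, fl, ('qualification',), "Vendor Qualification"),
--         (4, ql, ('third-party',), "TPRM- Questionnaire"),
--         (4, ql, ('vendor risk',), "TPRM- Questionnaire"),
--         (4, ql, ('tprm',), "TPRM- Questionnaire"),
--         (4, ql, ('third party',), "TPRM- Questionnaire"),
--         (4, ql, ('supplier',), "TPRM- Questionnaire"),
--         (4, ql, ('vendor management',), "TPRM- Questionnaire"),
--         (5, ql, ('security',), "Vendor Security Questionnaire"),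
--         (5, ql, ('authentication',), "Vendor Security Questionnaire"),
--         (5, ql, ('authorization',), "Vendor Security Questionnaire"),
--         (5, ql, ('encryption',), "Vendor Security Questionnaire"),
--         (5, ql, ('vulnerability',), "Vendor Security Questionnaire"),
--         (5, ql, ('incident',), "Vendor Security Questionnaire"),
--         (5, ql, ('cyber',), "Vendor Security Questionnaire"),
--         (5, ql, ('firewall',), "Vendor Security Questionnaire"),
--         (5, ql, ('malware',), "Vendor Security Questionnaire"),
--         (6, ql, ('sub-contractor',), "Sub Contractor Questionnaire"),
--         (6, ql, ('subcontractor',), "Sub Contractor Questionnaire"),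
--         (6, ql, ('sub contractor',), "Sub Contractor Questionnaire"),
--         (6, ql, ('employee',), "Sub Contractor Questionnaire"),
--         (6, ql, ('support',), "Sub Contractor Questionnaire"),
--         (6, ql, ('maintenance',), "Sub Contractor Questionnaire"),
--         (6, ql, ('sla',), "Sub Contractor Questionnaire"),
--         (7, ql, ('compliance',), "Vendor Qualification"),
--         (7, ql, ('certification',), "Vendor Qualification"),
--         (7, ql, ('regulatory',), "Vendor Qualification"),
--         (7, ql, ('gdpr',), "Vendor Qualification"),
--         (7, ql, ('soc',), "Vendor Qualification"),
--         (7, ql, ('iso',), "Vendor Qualification"),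
--         (7, ql, ('hipaa',), "Vendor Qualification"),
--         (7, ql, ('pci',), "Vendor Qualification"),
--         (7, ql, ('nist',), "Vendor Qualification"),
--         (7, ql, ('qualification',), "Vendor Qualification"),
--         (7, ql, ('certificate',), "Vendor Qualification"),
--         (8, cl, ('security',), "Vendor Security Questionnaire"),
--         (9, cl, ('compliance',), "Vendor Qualification"),
--     ]
--     matches = [(p, label) for (p, text, kws, label) in index
--                if all(k in text for k in kws)]
--     if not matches:
--         return "Vendor Qualification"
--     best = matches[0]
--     for m in matches[1:]:
--         if m[0] < best[0]:
--             best = m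
--     return best[1]
-- ===== Notes on version B (the rewrite author's own statement) =====
-- stated objective: alternative
-- what changed: Replaces the short-circuiting three-tier if/elif cascade by a flat keyword index of (priority, text, keywords, label) entries: B evaluates every entry, collects all matches, and returns the label of the minimal-priority match (default Vendor Qualification), which equals the cascade's first hit because priorities are listed in ascending order.
import Mathlib
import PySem

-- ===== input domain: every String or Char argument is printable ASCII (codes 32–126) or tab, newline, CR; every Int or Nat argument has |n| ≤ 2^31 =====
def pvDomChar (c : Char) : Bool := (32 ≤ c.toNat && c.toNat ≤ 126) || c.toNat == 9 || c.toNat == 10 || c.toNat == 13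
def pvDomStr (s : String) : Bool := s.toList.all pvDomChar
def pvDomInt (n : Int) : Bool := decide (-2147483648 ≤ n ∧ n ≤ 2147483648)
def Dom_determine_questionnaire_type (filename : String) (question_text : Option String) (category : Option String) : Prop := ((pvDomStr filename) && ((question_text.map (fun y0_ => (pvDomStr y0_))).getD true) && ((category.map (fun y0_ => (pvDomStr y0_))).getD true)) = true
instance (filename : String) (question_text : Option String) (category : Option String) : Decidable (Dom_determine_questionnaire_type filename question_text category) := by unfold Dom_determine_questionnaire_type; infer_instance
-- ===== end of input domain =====

-- B replaces A's short-circuiting three-tier if/elif cascade by a flat keyword index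
-- of (priority, text, keywords, label) entries: it collects ALL matches and returns the
-- label of the minimal-priority match (objective: alternative, data-driven).

-- ===== PORT A =====
def determine_questionnaire_type (filename : String) (question_text : Option String) (category : Option String) : String :=
  let filename_lower := PySem.Str.lower filename
  let question_lower := PySem.Str.lower (question_text.getD "")
  if PySem.Str.isIn "tprm" filename_lower || PySem.Str.isIn "third-party" filename_lower || PySem.Str.isIn "third_party" filename_lower then
    "TPRM- Questionnaire"
  else if PySem.Str.isIn "cybersecurity" filename_lower || PySem.Str.isIn "security" filename_lower then
    "Vendor Security Questionnaire"
  else if PySem.Str.isIn "sub" filename_lower && (PySem.Str.isIn "contractor" filename_lower || PySem.Str.isIn "contract" filename_lower) then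
    "Sub Contractor Questionnaire"
  else if PySem.Str.isIn "ai" filename_lower || PySem.Str.isIn "qualification" filename_lower then
    "Vendor Qualification"
  else if (["third-party", "vendor risk", "tprm", "third party", "supplier", "vendor management"]).any (fun k => PySem.Str.isIn k question_lower) then
    "TPRM- Questionnaire"
  else if (["security", "authentication", "authorization", "encryption", "vulnerability", "incident", "cyber", "firewall", "malware"]).any (fun k => PySem.Str.isIn k question_lower) then
    "Vendor Security Questionnaire"
  else if (["sub-contractor", "subcontractor", "sub contractor", "employee", "support", "maintenance", "sla"]).any (fun k => PySem.Str.isIn k question_lower) then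
    "Sub Contractor Questionnaire"
  else if (["compliance", "certification", "regulatory", "gdpr", "soc", "iso", "hipaa", "pci", "nist", "qualification", "certificate"]).any (fun k => PySem.Str.isIn k question_lower) then
    "Vendor Qualification"
  else
    match category with
    | none => "Vendor Qualification"
    | some c =>
      if c = "" then "Vendor Qualification"  -- Python truthiness: '' is falsy
      else
        let category_lower := PySem.Str.lower c
        if PySem.Str.isIn "security" category_lower then "Vendor Security Questionnaire"
        else if PySem.Str.isIn "compliance" category_lower then "Vendor Qualification"
        else "Vendor Qualification"

-- ===== PORT B =====
-- the explicit min-priority loop of Source B ('for m in matches[1:]: if m[0] < best[0]: best = m')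
def pvMinLoop : (Int × String) → List (Int × String) → (Int × String)
  | best, [] => best
  | best, m :: rest => pvMinLoop (if m.1 < best.1 then m else best) rest

-- the literal keyword-index data of Source B
def pvIndex (fl ql cl : String) : List (Int × String × List String × String) :=
  [ (0, fl, ["tprm"], "TPRM- Questionnaire"),
    (0, fl, ["third-party"], "TPRM- Questionnaire"),
    (0, fl, ["third_party"], "TPRM- Questionnaire"),
    (1, fl, ["cybersecurity"], "Vendor Security Questionnaire"),
    (1, fl, ["security"], "Vendor Security Questionnaire"),
    (2, fl, ["sub", "contractor"], "Sub Contractor Questionnaire"),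
    (2, fl, ["sub", "contract"], "Sub Contractor Questionnaire"),
    (3, fl, ["ai"], "Vendor Qualification"),
    (3, fl, ["qualification"], "Vendor Qualification"),
    (4, ql, ["third-party"], "TPRM- Questionnaire"),
    (4, ql, ["vendor risk"], "TPRM- Questionnaire"),
    (4, ql, ["tprm"], "TPRM- Questionnaire"),
    (4, ql, ["third party"], "TPRM- Questionnaire"),
    (4, ql, ["supplier"], "TPRM- Questionnaire"),
    (4, ql, ["vendor management"], "TPRM- Questionnaire"),
    (5, ql, ["security"], "Vendor Security Questionnaire"),
    (5, ql, ["authentication"], "Vendor Security Questionnaire"),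
    (5, ql, ["authorization"], "Vendor Security Questionnaire"),
    (5, ql, ["encryption"], "Vendor Security Questionnaire"),
    (5, ql, ["vulnerability"], "Vendor Security Questionnaire"),
    (5, ql, ["incident"], "Vendor Security Questionnaire"),
    (5, ql, ["cyber"], "Vendor Security Questionnaire"),
    (5, ql, ["firewall"], "Vendor Security Questionnaire"),
    (5, ql, ["malware"], "Vendor Security Questionnaire"),
    (6, ql, ["sub-contractor"], "Sub Contractor Questionnaire"),
    (6, ql, ["subcontractor"], "Sub Contractor Questionnaire"),
    (6, ql, ["sub contractor"], "Sub Contractor Questionnaire"),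
    (6, ql, ["employee"], "Sub Contractor Questionnaire"),
    (6, ql, ["support"], "Sub Contractor Questionnaire"),
    (6, ql, ["maintenance"], "Sub Contractor Questionnaire"),
    (6, ql, ["sla"], "Sub Contractor Questionnaire"),
    (7, ql, ["compliance"], "Vendor Qualification"),
    (7, ql, ["certification"], "Vendor Qualification"),
    (7, ql, ["regulatory"], "Vendor Qualification"),
    (7, ql, ["gdpr"], "Vendor Qualification"),
    (7, ql, ["soc"], "Vendor Qualification"),
    (7, ql, ["iso"], "Vendor Qualification"),
    (7, ql, ["hipaa"], "Vendor Qualification"),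
    (7, ql, ["pci"], "Vendor Qualification"),
    (7, ql, ["nist"], "Vendor Qualification"),
    (7, ql, ["qualification"], "Vendor Qualification"),
    (7, ql, ["certificate"], "Vendor Qualification"),
    (8, cl, ["security"], "Vendor Security Questionnaire"),
    (9, cl, ["compliance"], "Vendor Qualification") ]

def determine_questionnaire_type_alt (filename : String) (question_text : Option String) (category : Option String) : String :=
  let fl := PySem.Str.lower filename
  let ql := PySem.Str.lower (question_text.getD "")
  let cl := PySem.Str.lower (category.getD "")
  let index := pvIndex fl ql cl
  let found := index.filterMap (fun e =>
    if e.2.2.1.all (fun k => PySem.Str.isIn k e.2.1) then some (e.1, e.2.2.2) else none)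
  match found with
  | [] => "Vendor Qualification"
  | m :: rest => (pvMinLoop m rest).2

-- ===== PRECONDITION & SPEC =====
def Spec_determine_questionnaire_type (filename : String) (question_text : Option String) (category : Option String) (out : String) : Prop := out = determine_questionnaire_type_alt filename question_text category
instance (filename : String) (question_text : Option String) (category : Option String) (out : String) : Decidable (Spec_determine_questionnaire_type filename question_text category out) := by unfold Spec_determine_questionnaire_type; infer_instance

-- ===== CLAIM =====
def Claim_equal_determine_questionnaire_type : Prop := ∀ (filename : String) (question_text : Option String) (category : Option String), Dom_determine_questionnaire_type filename question_text category → Spec_determine_questionnaire_type filename question_text category (determine_questionnaire_type filename question_text category)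

-- ===== LEMMAS AND PROOFS =====

-- generic form of B's computation: collect all matches, take the min-priority one
def pvMatches (es : List (Int × String × List String × String)) : List (Int × String) :=
  es.filterMap (fun e =>
    if e.2.2.1.all (fun k => PySem.Str.isIn k e.2.1) then some (e.1, e.2.2.2) else none)

def pvSel (es : List (Int × String × List String × String)) : String :=
  match pvMatches es with
  | [] => "Vendor Qualification"
  | m :: rest => (pvMinLoop m rest).2

-- first-match cascade with default (A's shape)
def pvFM : List (Bool × String) → String
  | [] => "Vendor Qualification"
  | (b, l) :: t => if b then l else pvFM t

lemma pvMinLoop_eq_self : ∀ (l : List (Int × String)) (best : Int × String),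
    (∀ x ∈ l, ¬ x.1 < best.1) → pvMinLoop best l = best := by
  intro l
  induction l with
  | nil => intro best _; rfl
  | cons x t ih =>
    intro best h
    simp only [pvMinLoop]
    rw [if_neg (h x (by simp))]
    exact ih best (fun y hy => h y (by simp [hy]))

lemma mem_pvMatches_prio {es : List (Int × String × List String × String)} {x : Int × String}
    (hx : x ∈ pvMatches es) : ∃ e ∈ es, x.1 = e.1 := by
  unfold pvMatches at hx
  rw [List.mem_filterMap] at hx
  obtain ⟨e, he, hfe⟩ := hx
  refine ⟨e, he, ?_⟩
  by_cases hc : e.2.2.1.all (fun k => PySem.Str.isIn k e.2.1) = true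
  · rw [if_pos hc] at hfe
    cases hfe
    rfl
  · rw [if_neg hc] at hfe
    cases hfe

lemma pvFM_cons (b : Bool) (l : String) (t : List (Bool × String)) :
    pvFM ((b, l) :: t) = if b then l else pvFM t := rfl

lemma pvSel_eq_pvFM : ∀ (es : List (Int × String × List String × String)),
    List.Pairwise (fun a b : Int => a ≤ b) (es.map Prod.fst) →
    pvSel es = pvFM (es.map (fun e => (e.2.2.1.all (fun k => PySem.Str.isIn k e.2.1), e.2.2.2))) := by
  intro es
  induction es with
  | nil => intro _; rfl
  | cons e t ih =>
    intro h
    rw [List.map_cons, List.pairwise_cons] at h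
    obtain ⟨h1, h2⟩ := h
    by_cases hc : (e.2.2.1.all (fun k => PySem.Str.isIn k e.2.1)) = true
    · have hm : pvMatches (e :: t) = (e.1, e.2.2.2) :: pvMatches t := by
        unfold pvMatches
        rw [List.filterMap_cons, if_pos hc]
      have hsel : pvSel (e :: t) = (pvMinLoop (e.1, e.2.2.2) (pvMatches t)).2 := by
        unfold pvSel
        rw [hm]
      have hmin : pvMinLoop (e.1, e.2.2.2) (pvMatches t) = (e.1, e.2.2.2) := by
        apply pvMinLoop_eq_self
        intro x hx
        obtain ⟨r, hr, hxr⟩ := mem_pvMatches_prio hx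
        have := h1 r.1 (List.mem_map_of_mem hr)
        simp only [hxr]
        omega
      rw [hsel, hmin, List.map_cons, pvFM_cons, if_pos hc]
    · have hm : pvMatches (e :: t) = pvMatches t := by
        unfold pvMatches
        rw [List.filterMap_cons, if_neg hc]
      have hsel : pvSel (e :: t) = pvSel t := by
        unfold pvSel
        rw [hm]
      rw [hsel, ih h2, List.map_cons, pvFM_cons, if_neg hc]

lemma pv_if_or (a b : Bool) (x y : String) :
    (if a || b then x else y) = if a then x else if b then x else y := by
  cases a <;> simp

-- ===== VERDICT =====
set_option maxHeartbeats 1600000 in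
theorem determine_questionnaire_type_spec : Claim_equal_determine_questionnaire_type := by
  intro filename question_text category _
  unfold Spec_determine_questionnaire_type
  have halt : determine_questionnaire_type_alt filename question_text category
      = pvSel (pvIndex (PySem.Str.lower filename) (PySem.Str.lower (question_text.getD ""))
          (PySem.Str.lower (category.getD ""))) := rfl
  rw [halt]
  rw [pvSel_eq_pvFM _ (by simp only [pvIndex, List.map_cons, List.map_nil]; decide)]
  unfold determine_questionnaire_type pvIndex
  simp only [List.map_cons, List.map_nil, List.all_cons, List.all_nil, Bool.and_true,
    List.any_cons, List.any_nil, Bool.or_false, Bool.and_or_distrib_left, pv_if_or, pvFM]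
  cases category with
  | none =>
    have h1 : PySem.Str.isIn "security" (PySem.Str.lower ((none : Option String).getD "")) = false := by decide
    have h2 : PySem.Str.isIn "compliance" (PySem.Str.lower ((none : Option String).getD "")) = false := by decide
    simp only [h1, h2, if_false, Bool.false_eq_true]
  | some c =>
    by_cases hc : c = ""
    · subst hc
      have h1 : PySem.Str.isIn "security" (PySem.Str.lower ((some "" : Option String).getD "")) = false := by decide
      have h2 : PySem.Str.isIn "compliance" (PySem.Str.lower ((some "" : Option String).getD "")) = false := by decide
      simp only [h1, h2, if_false, Bool.false_eq_true]
      rfl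
    · simp only [if_neg hc, Option.getD_some]
      rfl
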